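-- pv_equiv track=rewrite | github.com/matte-v/project-euler | 11.py | make_horizontal_from_diag
-- ===== SOURCE A (Python) =====
-- def make_horizontal_from_diag(grid, token_size):
--     grid_d1 = []
--     # upper diagonal
--     for row in range(token_size - 1, len(grid)):
--         new_row = []
--         for idx, col in enumerate(range(0, row + 1)):
--             new_row.append(grid[row - idx][col])
--         grid_d1.append(new_row)
--     # lower diagonal
--     for col in range(1, len(grid) - token_size + 1):
--         new_row = []
--         for idx, row in enumerate(range(len(grid) - 1, col - 1, -1)):
--             new_row.append(grid[row][col + idx])
--         grid_d1.append(new_row)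
--     return grid_d1
-- ===== SOURCE B (Python) =====
-- def make_horizontal_from_diag(grid, token_size):
--     n = len(grid)
--     # Group the square part of the grid's cells by anti-diagonal index i+j in one
--     # sweep over the rows (bottom to top, so each bucket is in decreasing-row order),
--     # then read off the buckets whose diagonal is long enough (>= token_size).
--     buckets = {}
--     for i in range(n - 1, -1, -1):
--         for j, v in enumerate(grid[i][:n]):
--             buckets.setdefault(i + j, []).append(v)
--     return [buckets.get(d, []) for d in range(token_size - 1, 2 * n - token_size)]
-- ===== Notes on version B (the rewrite author's own statement) =====
-- stated objective: alternative
-- what changed: Replaces A's two explicit per-diagonal index phases (upper diagonals by start row, lower diagonals by start column, each a nested enumerate loop computing cell coordinates) by one sweep over the rows that groups the cells of the square grid into a dictionary of buckets keyed by the anti-diagonal index i+j (rows scanned bottom-up so each bucket comes out in A's decreasing-row order), then reads off the buckets for the kept diagonal indices.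
import Mathlib
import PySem

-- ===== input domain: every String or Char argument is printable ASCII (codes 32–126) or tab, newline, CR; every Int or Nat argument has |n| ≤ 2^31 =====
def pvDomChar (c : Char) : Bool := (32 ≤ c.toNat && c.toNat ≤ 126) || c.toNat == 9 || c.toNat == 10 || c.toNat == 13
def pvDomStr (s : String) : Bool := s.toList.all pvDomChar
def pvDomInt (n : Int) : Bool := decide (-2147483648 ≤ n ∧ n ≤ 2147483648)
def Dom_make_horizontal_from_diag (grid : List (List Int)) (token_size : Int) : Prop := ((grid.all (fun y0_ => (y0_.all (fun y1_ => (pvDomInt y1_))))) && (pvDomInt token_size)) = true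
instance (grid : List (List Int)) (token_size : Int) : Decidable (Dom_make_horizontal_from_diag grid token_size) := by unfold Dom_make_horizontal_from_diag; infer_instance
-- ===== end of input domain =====

-- B replaces A's explicit per-diagonal index loops (upper phase by start row, lower phase by start
-- column) by one sweep over the rows that groups the cells of the square grid into a dictionary of
-- buckets keyed by the anti-diagonal index i+j, then reads off the buckets; objective: alternative.

-- ===== PORT A =====
def make_horizontal_from_diag (grid : List (List Int)) (token_size : Int) : List (List Int) :=
  -- upper diagonal: each iteration appends one new_row, itself built by appending one cell
  -- per iteration; the append-accumulation loops are transliterated as maps (same cells, same order)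
  let grid_d1 : List (List Int) :=
    (PySem.List.pyRange (token_size - 1) (PySem.List.len grid) 1).map
      (fun row =>
        (PySem.List.enumerate (PySem.List.pyRange 0 (row + 1) 1)).map
          -- grid[row - idx][col]  (p = (idx, col)); pyGetD is exact where Python does not raise (Pre_)
          (fun p => PySem.List.pyGetD (PySem.List.pyGetD grid (row - p.1) []) p.2 0))
  -- lower diagonal
  grid_d1 ++
    (PySem.List.pyRange 1 (PySem.List.len grid - token_size + 1) 1).map
      (fun col =>
        (PySem.List.enumerate (PySem.List.pyRange (PySem.List.len grid - 1) (col - 1) (-1))).map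
          -- grid[row][col + idx]  (p = (idx, row))
          (fun p => PySem.List.pyGetD (PySem.List.pyGetD grid p.2 []) (col + p.1) 0))

-- ===== PORT B =====
def make_horizontal_from_diag_alt (grid : List (List Int)) (token_size : Int) : List (List Int) :=
  let n : Int := PySem.List.len grid
  -- buckets.setdefault(i + j, []).append(v)  is  b.modify (i + j) [] (· ++ [v])
  let buckets : PySem.Dict Int (List Int) :=
    (PySem.List.pyRange (n - 1) (-1) (-1)).foldl
      (fun b i =>
        (PySem.List.enumerate (PySem.List.slice (PySem.List.pyGetD grid i []) none (some n))).foldl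
          (fun b p => b.modify (i + p.1) [] (· ++ [p.2])) b)
      PySem.Dict.empty
  (PySem.List.pyRange (token_size - 1) (2 * n - token_size) 1).map
    (fun d => buckets.getD d [])

-- ===== PRECONDITION & SPEC =====
-- Exactly the inputs on which the Python A returns (no IndexError): A reads cell (i, j) iff
-- token_size-1 ≤ i+j ≤ 2n-token_size-1 (i, j < n = len(grid)); every such cell must exist in its row.
def Pre_make_horizontal_from_diag (grid : List (List Int)) (token_size : Int) : Prop :=
  ∀ i ∈ List.range grid.length, ∀ j ∈ List.range grid.length,
    token_size - 1 ≤ (i : Int) + (j : Int) →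
    (i : Int) + (j : Int) ≤ 2 * (grid.length : Int) - token_size - 1 →
    j < (grid.getD i []).length
instance (grid : List (List Int)) (token_size : Int) : Decidable (Pre_make_horizontal_from_diag grid token_size) := by unfold Pre_make_horizontal_from_diag; infer_instance
def pvWitness_make_horizontal_from_diag : List (List Int) × Int := ([[1, 2], [3, 4]], 2)

def Spec_make_horizontal_from_diag (grid : List (List Int)) (token_size : Int) (out : List (List Int)) : Prop := out = make_horizontal_from_diag_alt grid token_size
instance (grid : List (List Int)) (token_size : Int) (out : List (List Int)) : Decidable (Spec_make_horizontal_from_diag grid token_size out) := by unfold Spec_make_horizontal_from_diag; infer_instance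

-- ===== CLAIM (what is proved, stated in full; the proofs are below) =====
def Claim_equal_make_horizontal_from_diag : Prop := ∀ (grid : List (List Int)) (token_size : Int), Dom_make_horizontal_from_diag grid token_size → Pre_make_horizontal_from_diag grid token_size → Spec_make_horizontal_from_diag grid token_size (make_horizontal_from_diag grid token_size)

-- ===== LEMMAS AND PROOFS =====

-- the common reference point of the two proofs: the list of kept anti-diagonals in closed form
def pvDiagClosed (grid : List (List Int)) (token_size : Int) : List (List Int) :=
  let n : Int := (grid.length : Int)
  (PySem.List.pyRange (token_size - 1) (2 * n - token_size) 1).map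
    (fun d =>
      (PySem.List.pyRange (min d (n - 1)) (max 0 (d - n + 1) - 1) (-1)).map
        (fun i => PySem.List.pyGetD (PySem.List.pyGetD grid i []) (d - i) 0))

-- enumerate of a range-comprehension, in closed form
lemma pv_enum_map_range (m : Nat) (f : Nat → Int) (s : Int) :
    PySem.List.enumerate ((List.range m).map f) s
      = (List.range m).map (fun (k : Nat) => (s + (k : Int), f k)) := by
  induction m generalizing s with
  | zero => simp [PySem.List.enumerate_nil]
  | succ m ih =>
      rw [List.range_succ]
      simp only [List.map_append, List.map_cons, List.map_nil,
        PySem.List.enumerate_append, ih]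
      simp [PySem.List.enumerate_cons, PySem.List.enumerate_nil]

-- A reads the diagonals cell by cell in exactly the closed-form order
lemma pv_a_eq_closed (grid : List (List Int)) (token_size : Int) :
    make_horizontal_from_diag grid token_size = pvDiagClosed grid token_size := by
  simp only [make_horizontal_from_diag, pvDiagClosed, PySem.List.len_eq]
  set g : Int → Int → Int :=
    fun i j => PySem.List.pyGetD (PySem.List.pyGetD grid i []) j 0 with hg
  set N : Int := ((grid.length : Nat) : Int) with hN
  have hN0 : 0 ≤ N := by positivity
  by_cases hts : token_size ≤ N
  · -- the interesting case: split B's range at N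
    rw [PySem.List.pyRange_one_append (token_size - 1) N (2 * N - token_size)
        (by omega) (by omega), List.map_append]
    congr 1
    · -- upper diagonals: d = row
      apply List.map_congr_left
      intro r hr
      rw [PySem.List.mem_pyRange_one] at hr
      have h1 : min r (N - 1) = r := by omega
      have h2 : max 0 (r - N + 1) - 1 = -1 := by omega
      rw [h1, h2, PySem.List.pyRange_neg_one, PySem.List.pyRange_one, pv_enum_map_range,
        List.map_map, List.map_map]
      have h3 : (r - -1).toNat = (r + 1 - 0).toNat := by omega
      rw [h3]
      apply List.map_congr_left
      intro k _
      simp only [Function.comp]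
      rw [show (0 : Int) + (k : Int) = (k : Int) by ring]
      congr 1
      omega
    · -- lower diagonals: d = N - 1 + col
      rw [PySem.List.pyRange_one, PySem.List.pyRange_one]
      have h4 : (2 * N - token_size - N).toNat = (N - token_size + 1 - 1).toNat := by omega
      rw [h4, List.map_map, List.map_map]
      apply List.map_congr_left
      intro k hk
      rw [List.mem_range] at hk
      simp only [Function.comp]
      set c : Int := 1 + (k : Int) with hc
      have hc1 : (1 : Int) ≤ c := by omega
      have hd : N + (k : Int) = N - 1 + c := by omega
      rw [hd]
      have h5 : min (N - 1 + c) (N - 1) = N - 1 := by omega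
      have h6 : max 0 (N - 1 + c - N + 1) - 1 = c - 1 := by omega
      rw [h5, h6, PySem.List.pyRange_neg_one, pv_enum_map_range,
        List.map_map, List.map_map]
      apply List.map_congr_left
      intro k' _
      simp only [Function.comp]
      congr 1
      omega
  · -- token_size > N: every range is empty on both sides
    rw [PySem.List.pyRange_one_eq_nil (by omega), PySem.List.pyRange_one_eq_nil (by omega),
      PySem.List.pyRange_one_eq_nil (by omega)]
    simp

-- shifting the start of enumerate into the keys
lemma pv_enum_shift (xs : List Int) (c s : Int) :
    (PySem.List.enumerate xs s).map (fun p => (c + p.1, p.2))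
      = PySem.List.enumerate xs (c + s) := by
  induction xs generalizing s with
  | nil => simp [PySem.List.enumerate_nil]
  | cons x t ih => simp [PySem.List.enumerate_cons, ih, add_assoc]

-- the cells of one enumerated row that land on diagonal key d: at most one
lemma pv_enum_filter (xs : List Int) (t d : Int) :
    (((PySem.List.enumerate xs t).filter (fun q => q.1 == d)).map (·.2))
      = if t ≤ d ∧ d < t + (xs.length : Int) then [xs.getD (d - t).toNat 0] else [] := by
  induction xs generalizing t with
  | nil =>
      rw [PySem.List.enumerate_nil, if_neg (by simp)]
      rfl
  | cons x r ih =>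
      rw [PySem.List.enumerate_cons]
      by_cases hxd : t = d
      · subst hxd
        have hnone : ∀ c, c ∈ PySem.List.enumerate r (t + 1) → ¬ (c.1 == t) := by
          intro c hc
          have : c.1 ∈ (PySem.List.enumerate r (t + 1)).map (·.1) := List.mem_map_of_mem hc
          rw [PySem.List.map_fst_enumerate, PySem.List.mem_pyRange_one] at this
          simp only [beq_iff_eq]
          omega
        rw [List.filter_cons_of_pos (by simp)]
        rw [List.filter_eq_nil_iff.mpr (by intro c hc; simpa using hnone c hc)]
        rw [if_pos (by refine ⟨le_refl t, ?_⟩; simp only [List.length_cons]; push_cast; omega)]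
        simp
      · rw [List.filter_cons_of_neg (by simpa using hxd)]
        rw [ih (t + 1)]
        by_cases hcond : t + 1 ≤ d ∧ d < t + 1 + (r.length : Int)
        · rw [if_pos hcond, if_pos (by simp only [List.length_cons] at hcond ⊢; push_cast at hcond ⊢; omega)]
          have hk : (d - t).toNat = (d - (t + 1)).toNat + 1 := by omega
          rw [hk]
          simp [List.getD]
        · rw [if_neg hcond, if_neg (by simp only [List.length_cons] at hcond ⊢; push_cast at hcond ⊢; omega)]

-- a descending scan with an interval guard is the descending scan of the interval
lemma pv_fm (F : Int → Int) (lo hi : Int) (hlo : 0 ≤ lo) :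
    ∀ a : Int,
      (PySem.List.pyRange a (-1) (-1)).flatMap
          (fun i => if lo ≤ i ∧ i ≤ hi then [F i] else [])
        = (PySem.List.pyRange (min a hi) (lo - 1) (-1)).map F := by
  suffices H : ∀ (m : Nat) (a : Int), a < (m : Int) →
      (PySem.List.pyRange a (-1) (-1)).flatMap
          (fun i => if lo ≤ i ∧ i ≤ hi then [F i] else [])
        = (PySem.List.pyRange (min a hi) (lo - 1) (-1)).map F by
    intro a
    exact H ((a + 1).toNat + 1) a (by omega)
  intro m
  induction m with
  | zero =>
      intro a ha
      rw [PySem.List.pyRange_neg_one_eq_nil (by omega),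
        PySem.List.pyRange_neg_one_eq_nil (by omega)]
      simp
  | succ m ih =>
      intro a ha
      by_cases ha0 : a < 0
      · rw [PySem.List.pyRange_neg_one_eq_nil (by omega),
          PySem.List.pyRange_neg_one_eq_nil (by omega)]
        simp
      · rw [PySem.List.pyRange_neg_one_cons (by omega), List.flatMap_cons,
          ih (a - 1) (by omega)]
        by_cases h1 : lo ≤ a ∧ a ≤ hi
        · rw [if_pos h1]
          have hmin : min a hi = a := by omega
          have hmin' : min (a - 1) hi = a - 1 := by omega
          rw [hmin, hmin']
          rw [show PySem.List.pyRange a (lo - 1) (-1)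
              = a :: PySem.List.pyRange (a - 1) (lo - 1) (-1) from
            PySem.List.pyRange_neg_one_cons (by omega), List.map_cons]
          rfl
        · rw [if_neg h1, List.nil_append]
          by_cases h2 : hi < a
          · have : min (a - 1) hi = min a hi := by omega
            rw [this]
          · -- a < lo: both ranges empty
            have hal : a < lo := by omega
            rw [PySem.List.pyRange_neg_one_eq_nil (by omega),
              PySem.List.pyRange_neg_one_eq_nil (by omega)]

-- the bucket of diagonal d of B's dictionary, for a kept d, in closed form
lemma pv_bucket (grid : List (List Int)) (token_size d : Int)
    (hpre : Pre_make_horizontal_from_diag grid token_size)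
    (hd1 : token_size - 1 ≤ d) (hd2 : d < 2 * (grid.length : Int) - token_size) :
    (((PySem.List.pyRange ((grid.length : Int) - 1) (-1) (-1)).foldl
        (fun b i =>
          (PySem.List.enumerate
              (PySem.List.slice (PySem.List.pyGetD grid i []) none (some (grid.length : Int)))).foldl
            (fun b p => b.modify (i + p.1) [] (· ++ [p.2])) b)
        (PySem.Dict.empty : PySem.Dict Int (List Int))).getD d [])
      = (PySem.List.pyRange (min d ((grid.length : Int) - 1))
            (max 0 (d - (grid.length : Int) + 1) - 1) (-1)).map
          (fun i => PySem.List.pyGetD (PySem.List.pyGetD grid i []) (d - i) 0) := by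
  set n : Int := (grid.length : Int) with hn
  have hn0 : 0 ≤ n := by positivity
  -- fold the two nested loops into one fold over all (key, value) cell pairs
  have h1 : ∀ (b : PySem.Dict Int (List Int)) (i : Int),
      (PySem.List.enumerate
          (PySem.List.slice (PySem.List.pyGetD grid i []) none (some n))).foldl
        (fun b p => b.modify (i + p.1) [] (· ++ [p.2])) b
      = (((PySem.List.enumerate
            (PySem.List.slice (PySem.List.pyGetD grid i []) none (some n))).map
            (fun p => (i + p.1, p.2))).foldl
          (fun b q => b.modify q.1 [] (· ++ [q.2])) b) := by
    intro b i
    rw [List.foldl_map]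
  rw [show (fun (b : PySem.Dict Int (List Int)) (i : Int) =>
      (PySem.List.enumerate
          (PySem.List.slice (PySem.List.pyGetD grid i []) none (some n))).foldl
        (fun b p => b.modify (i + p.1) [] (· ++ [p.2])) b)
    = (fun b i => (((PySem.List.enumerate
            (PySem.List.slice (PySem.List.pyGetD grid i []) none (some n))).map
            (fun p => (i + p.1, p.2))).foldl
          (fun b q => b.modify q.1 [] (· ++ [q.2])) b)) from funext fun b => funext fun i => h1 b i]
  rw [← List.foldl_flatMap]
  rw [PySem.Dict.getD_foldl_modify_append]
  rw [PySem.Dict.getD_empty, List.nil_append]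
  rw [List.filter_flatMap, List.map_flatMap]
  -- per row: the filtered cells in closed form
  have h2 : ∀ i : Int, 0 ≤ i → i < n →
      ((((PySem.List.enumerate
            (PySem.List.slice (PySem.List.pyGetD grid i []) none (some n))).map
            (fun p => (i + p.1, p.2))).filter (fun p => p.1 == d)).map (·.2))
      = if max 0 (d - n + 1) ≤ i ∧ i ≤ min d (n - 1)
          then [PySem.List.pyGetD (PySem.List.pyGetD grid i []) (d - i) 0] else [] := by
    intro i hi0 hin
    have hiN : i.toNat < grid.length := by omega
    have hrow : PySem.List.pyGetD grid i [] = grid[i.toNat] :=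
      PySem.List.pyGetD_eq_getElem _ _ hi0 (by omega)
    have hslice : PySem.List.slice (grid[i.toNat] : List Int) none (some n)
        = (grid[i.toNat] : List Int).take n.toNat := PySem.List.slice_to _ hn0
    rw [hrow, hslice, pv_enum_shift]
    simp only [add_zero]
    rw [pv_enum_filter]
    have hxslen : (((grid[i.toNat] : List Int).take n.toNat).length : Int)
        = min n ((grid[i.toNat] : List Int).length : Int) := by
      simp [List.length_take]; omega
    by_cases hc : max 0 (d - n + 1) ≤ i ∧ i ≤ min d (n - 1)
    · -- the cell exists: Pre_ says the row is long enough
      have hjlen : d - i < ((grid[i.toNat] : List Int).length : Int) := by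
        have hp := hpre i.toNat (by simp; omega) (d - i).toNat (by simp; omega)
          (by omega) (by omega)
        rw [List.getD_eq_getElem _ _ hiN] at hp
        omega
      rw [if_pos (by omega), if_pos hc]
      have hk : (d - i).toNat < ((grid[i.toNat] : List Int).take n.toNat).length := by
        simp [List.length_take]; omega
      rw [List.getD_eq_getElem _ _ hk, List.getElem_take,
        PySem.List.pyGetD_eq_getElem _ _ (by omega) hjlen]
    · rw [if_neg (by omega), if_neg hc]
  -- replace each row's contribution by the interval-guarded form, then close the scan
  have h3 : ∀ l : List Int, (∀ i ∈ l, 0 ≤ i ∧ i < n) →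
      l.flatMap (fun i =>
        (((PySem.List.enumerate
              (PySem.List.slice (PySem.List.pyGetD grid i []) none (some n))).map
            (fun p => (i + p.1, p.2))).filter (fun p => p.1 == d)).map (·.2))
      = l.flatMap (fun i => if max 0 (d - n + 1) ≤ i ∧ i ≤ min d (n - 1)
          then [PySem.List.pyGetD (PySem.List.pyGetD grid i []) (d - i) 0] else []) := by
    intro l hl
    induction l with
    | nil => rfl
    | cons a t iht =>
        simp only [List.flatMap_cons]
        rw [h2 a (hl a (by simp)).1 (hl a (by simp)).2,
          iht (fun i hi => hl i (by simp [hi]))]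
  rw [h3 _ (fun i hi => by rw [PySem.List.mem_pyRange_neg_one] at hi; omega)]
  rw [pv_fm (fun i => PySem.List.pyGetD (PySem.List.pyGetD grid i []) (d - i) 0)
    (max 0 (d - n + 1)) (min d (n - 1)) (by omega) (n - 1)]
  have hmm : min (n - 1) (min d (n - 1)) = min d (n - 1) := by omega
  rw [hmm]

-- B equals the closed form wherever A does not raise
lemma pv_b_eq_closed (grid : List (List Int)) (token_size : Int)
    (hpre : Pre_make_horizontal_from_diag grid token_size) :
    make_horizontal_from_diag_alt grid token_size = pvDiagClosed grid token_size := by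
  simp only [make_horizontal_from_diag_alt, pvDiagClosed, PySem.List.len_eq]
  apply List.map_congr_left
  intro d hd
  rw [PySem.List.mem_pyRange_one] at hd
  exact pv_bucket grid token_size d hpre hd.1 hd.2

-- ===== VERDICT (by name: the statement is the Claim_ definition above) =====
theorem make_horizontal_from_diag_spec : Claim_equal_make_horizontal_from_diag := by
  intro grid token_size _ hpre
  unfold Spec_make_horizontal_from_diag
  rw [pv_a_eq_closed, pv_b_eq_closed grid token_size hpre]
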